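-- pv_equiv track=rewrite | github.com/F-I-D-O/line_planning | line_planning/instance.py | compute_travel_times_on_lines
-- ===== SOURCE A (Python) =====
-- def compute_travel_times_on_lines(candidate_set_of_lines, distances):
--     travel_times_on_lines = []
--
--     line = []
--     travel_for_one_line = []
--     for i in range(len(candidate_set_of_lines)):
--         line = candidate_set_of_lines[i]
--         travel_for_one_line = [[-1 for j in range(len(line))] for i in range(len(line))]
--         for j in range(len(line)):
--             travel_time = 0
--             travel_for_one_line[j][j] = 0
--             for k in range(j + 1, len(line)):
--                 travel_time += distances[line[k - 1]][line[k]]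
--                 travel_for_one_line[j][k] = travel_time
--         travel_times_on_lines.append(travel_for_one_line)
--     return travel_times_on_lines
-- ===== SOURCE B (Python) =====
-- def compute_travel_times_on_lines(candidate_set_of_lines, distances):
--     result = []
--     for line in candidate_set_of_lines:
--         prefix = [0]
--         for a, b in zip(line, line[1:]):
--             prefix.append(prefix[-1] + distances[a][b])
--         n = len(line)
--         result.append([[-1 if k < j else prefix[k] - prefix[j] for k in range(n)]
--                        for j in range(n)])
--     return result
-- ===== Notes on version B (the rewrite author's own statement) =====
-- stated objective: simpler
-- what changed: Replaces the per-row restart of a running travel-time sum with one prefix-sum array per line, from which every upper-triangle entry is obtained as prefix[k]-prefix[j] in a comprehension, eliminating the mutated -1 matrix and the triple nested index loop.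
import Mathlib
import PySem

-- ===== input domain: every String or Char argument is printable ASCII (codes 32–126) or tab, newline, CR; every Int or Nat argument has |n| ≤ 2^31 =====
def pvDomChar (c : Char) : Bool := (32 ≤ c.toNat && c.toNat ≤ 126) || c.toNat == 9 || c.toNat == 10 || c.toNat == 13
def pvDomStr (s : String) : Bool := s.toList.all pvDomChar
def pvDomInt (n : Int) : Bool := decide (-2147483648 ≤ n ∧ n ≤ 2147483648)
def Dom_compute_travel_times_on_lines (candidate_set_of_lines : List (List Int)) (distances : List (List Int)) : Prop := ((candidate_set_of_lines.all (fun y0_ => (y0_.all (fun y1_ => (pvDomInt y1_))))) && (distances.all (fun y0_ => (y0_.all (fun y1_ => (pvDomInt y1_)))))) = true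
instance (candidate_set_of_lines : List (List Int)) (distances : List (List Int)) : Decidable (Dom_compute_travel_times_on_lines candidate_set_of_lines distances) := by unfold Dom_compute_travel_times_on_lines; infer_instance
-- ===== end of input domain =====

-- B replaces A's mutated -1 matrix and per-row restarted running sum by one prefix-sum
-- array per line and a comprehension (objective: simpler); return value only, no mutation.

-- shared indexing helper: transliterates Python's `distances[a][b]` (negative-index
-- wraparound like Python; exact under Pre_, which excludes IndexError)
def pvDist (distances : List (List Int)) (a b : Int) : Int :=
  (PySem.List.pyGet? ((PySem.List.pyGet? distances a).getD []) b).getD 0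

-- ===== PORT A =====
-- inner `for k in range(j+1, len(line))` loop of A, state (travel_time, matrix)
def pvRowLoopA (distances : List (List Int)) (line : List Int) (j : Nat)
    (M : List (List Int)) : List (List Int) :=
  ((List.range' (j+1) (line.length - (j+1))).foldl
    (fun (st : Int × List (List Int)) k =>
      let t := st.1 + pvDist distances (line.getD (k-1) 0) (line.getD k 0)
      (t, st.2.set j ((st.2.getD j []).set k t)))
    ((0 : Int), M.set j ((M.getD j []).set j 0))).2

def compute_travel_times_on_lines (candidate_set_of_lines : List (List Int)) (distances : List (List Int)) : List (List (List Int)) :=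
  candidate_set_of_lines.foldl
    (fun acc line =>
      let n := line.length
      let init := List.replicate n (List.replicate n (-1 : Int))
      acc ++ [(List.range n).foldl (fun M j => pvRowLoopA distances line j M) init])
    []

-- ===== PORT B =====
def pvPrefixB (distances : List (List Int)) (line : List Int) : List Int :=
  (line.zip line.tail).foldl
    (fun p ab => p ++ [p.getLastD 0 + pvDist distances ab.1 ab.2]) [0]

def compute_travel_times_on_lines_alt (candidate_set_of_lines : List (List Int)) (distances : List (List Int)) : List (List (List Int)) :=
  candidate_set_of_lines.map (fun line =>
    let pfx := pvPrefixB distances line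
    (List.range line.length).map (fun j =>
      (List.range line.length).map (fun k =>
        if k < j then -1 else pfx.getD k 0 - pfx.getD j 0)))

-- ===== PRECONDITION & SPEC =====
-- Pre_ excludes exactly the inputs on which Python A raises IndexError: some consecutive
-- pair (a, b) of a line fails the lookup distances[a][b].
def Pre_compute_travel_times_on_lines (candidate_set_of_lines : List (List Int)) (distances : List (List Int)) : Prop :=
  ∀ line ∈ candidate_set_of_lines, ∀ ab ∈ line.zip line.tail,
    PySem.List.pyGet? distances ab.1 ≠ none ∧
    PySem.List.pyGet? ((PySem.List.pyGet? distances ab.1).getD []) ab.2 ≠ none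
instance (candidate_set_of_lines : List (List Int)) (distances : List (List Int)) : Decidable (Pre_compute_travel_times_on_lines candidate_set_of_lines distances) := by unfold Pre_compute_travel_times_on_lines; infer_instance

def pvWitness_compute_travel_times_on_lines : List (List Int) × List (List Int) :=
  ([[0, 1, 0]], [[0, 3], [4, 0]])

def Spec_compute_travel_times_on_lines (candidate_set_of_lines : List (List Int)) (distances : List (List Int)) (out : List (List (List Int))) : Prop := out = compute_travel_times_on_lines_alt candidate_set_of_lines distances
instance (candidate_set_of_lines : List (List Int)) (distances : List (List Int)) (out : List (List (List Int))) : Decidable (Spec_compute_travel_times_on_lines candidate_set_of_lines distances out) := by unfold Spec_compute_travel_times_on_lines; infer_instance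

-- ===== CLAIM (what is proved, stated in full; the proofs are below) =====
def Claim_equal_compute_travel_times_on_lines : Prop := ∀ (candidate_set_of_lines : List (List Int)) (distances : List (List Int)), Dom_compute_travel_times_on_lines candidate_set_of_lines distances → Pre_compute_travel_times_on_lines candidate_set_of_lines distances → Spec_compute_travel_times_on_lines candidate_set_of_lines distances (compute_travel_times_on_lines candidate_set_of_lines distances)

-- ===== LEMMAS AND PROOFS =====

-- index-based step weight along a line: pvD t = distances[line[t-1]][line[t]]
def pvD (D : List (List Int)) (l : List Int) (t : Nat) : Int :=
  pvDist D (l.getD (t-1) 0) (l.getD t 0)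

-- segment sum of step weights over t ∈ [s, s+c)
def pvSeg (D : List (List Int)) (l : List Int) (s c : Nat) : Int :=
  ((List.range' s c).map (pvD D l)).sum

theorem pvSeg_append (D : List (List Int)) (l : List Int) (s m n : Nat) :
    pvSeg D l s (m+n) = pvSeg D l s m + pvSeg D l (s+m) n := by
  unfold pvSeg
  rw [← List.range'_append_1, List.map_append, List.sum_append]

theorem pvSeg_concat (D : List (List Int)) (l : List Int) (s n : Nat) :
    pvSeg D l s (n+1) = pvSeg D l s n + pvD D l (s+n) := by
  rw [pvSeg_append]
  simp [pvSeg, List.range'_one]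

-- A's inner fold over a one-dimensional row: indices s..s+c-1 set to the running sums
theorem pvInnerFold_spec (D : List (List Int)) (l : List Int) :
    ∀ (c s : Nat) (t : Int) (r : List Int), s + c ≤ r.length →
    (((List.range' s c).foldl
        (fun (st : Int × List Int) k =>
          let t' := st.1 + pvD D l k
          (t', st.2.set k t'))
        (t, r)).2.length = r.length) ∧
    (∀ m : Nat, ((List.range' s c).foldl
        (fun (st : Int × List Int) k =>
          let t' := st.1 + pvD D l k
          (t', st.2.set k t'))
        (t, r)).2.getD m 0 =
      if s ≤ m ∧ m < s + c then t + pvSeg D l s (m + 1 - s) else r.getD m 0) := by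
  intro c
  induction c with
  | zero =>
      intro s t r _
      refine ⟨rfl, ?_⟩
      intro m
      simp only [List.range', List.foldl_nil]
      rw [if_neg (by omega)]
  | succ c ih =>
      intro s t r hr
      rw [List.range'_succ, List.foldl_cons]
      obtain ⟨hlen, hent⟩ := ih (s+1) (t + pvD D l s) (r.set s (t + pvD D l s))
        (by simpa using (by omega : s + 1 + c ≤ r.length))
      refine ⟨by simpa using hlen, ?_⟩
      intro m
      rw [hent m]
      by_cases h1 : s + 1 ≤ m ∧ m < s + 1 + c
      · simp only [if_pos h1, if_pos (show s ≤ m ∧ m < s + (c+1) by omega)]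
        have h2 : m + 1 - s = 1 + (m + 1 - (s+1)) := by omega
        rw [h2, pvSeg_append]
        simp [pvSeg, List.range'_one]
        ring
      · simp only [if_neg h1]
        by_cases h2 : s ≤ m ∧ m < s + (c + 1)
        · have hm : m = s := by omega
          simp only [hm]
          rw [List.getD_eq_getElem?_getD, List.getElem?_set_self (by omega)]
          have hss : s + 1 - s = 1 := by omega
          simp [hss, pvSeg, List.range'_one]
        · simp only [if_neg h2]
          rw [List.getD_eq_getElem?_getD, List.getD_eq_getElem?_getD,
              List.getElem?_set_ne (by omega)]

-- the matrix-level inner fold only touches row j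
theorem pvFoldRow_comm (D : List (List Int)) (l : List Int) (j : Nat) :
    ∀ (ks : List Nat) (t : Int) (M : List (List Int)) (r : List Int), j < M.length →
    (ks.foldl
      (fun (st : Int × List (List Int)) k =>
        let t' := st.1 + pvD D l k
        (t', st.2.set j ((st.2.getD j []).set k t')))
      (t, M.set j r))
    = ((ks.foldl (fun (st : Int × List Int) k =>
          let t' := st.1 + pvD D l k
          (t', st.2.set k t')) (t, r)).1,
       M.set j (ks.foldl (fun (st : Int × List Int) k =>
          let t' := st.1 + pvD D l k
          (t', st.2.set k t')) (t, r)).2) := by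
  intro ks
  induction ks with
  | nil => intro t M r _; rfl
  | cons k ks ih =>
      intro t M r hj
      simp only [List.foldl_cons]
      have hget : (M.set j r).getD j [] = r := by
        rw [List.getD_eq_getElem?_getD, List.getElem?_set_self hj]; rfl
      rw [hget, List.set_set]
      exact ih _ M _ hj

-- closed form of A's row j (for a line of length n)
def pvRowA (D : List (List Int)) (l : List Int) (j n : Nat) : List Int :=
  ((List.range' (j+1) (n - (j+1))).foldl
    (fun (st : Int × List Int) k =>
      let t' := st.1 + pvD D l k
      (t', st.2.set k t'))
    ((0 : Int), (List.replicate n (-1 : Int)).set j 0)).2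

theorem pvRowA_length (D : List (List Int)) (l : List Int) (j n : Nat) (hj : j < n) :
    (pvRowA D l j n).length = n := by
  have h := (pvInnerFold_spec D l (n - (j+1)) (j+1) 0
    ((List.replicate n (-1 : Int)).set j 0) (by simp; omega)).1
  simpa [pvRowA] using h

theorem pvRowA_getD (D : List (List Int)) (l : List Int) (j n : Nat) (hj : j < n)
    (k : Nat) (hk : k < n) :
    (pvRowA D l j n).getD k 0 = if k < j then -1 else pvSeg D l (j+1) (k - j) := by
  have h := (pvInnerFold_spec D l (n - (j+1)) (j+1) 0
    ((List.replicate n (-1 : Int)).set j 0) (by simp; omega)).2 k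
  rw [pvRowA, h]
  by_cases h1 : j + 1 ≤ k ∧ k < j + 1 + (n - (j+1))
  · rw [if_pos h1, if_neg (by omega)]
    have : k + 1 - (j+1) = k - j := by omega
    rw [this]; ring
  · rw [if_neg h1]
    have hkj : k ≤ j := by omega
    by_cases h2 : k = j
    · subst h2
      rw [List.getD_eq_getElem?_getD, List.getElem?_set_self (by simpa using hj)]
      simp [pvSeg]
    · rw [List.getD_eq_getElem?_getD, List.getElem?_set_ne (by omega), if_pos (by omega)]
      simp [Nat.lt_of_le_of_lt hkj hj]

-- A's per-line matrix fold, characterized row by row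
theorem pvFoldA_spec (D : List (List Int)) (l : List Int) (n : Nat) (hn : n = l.length) :
    ∀ m ≤ n,
    ((List.range m).foldl (fun M j => pvRowLoopA D l j M)
        (List.replicate n (List.replicate n (-1 : Int)))).length = n ∧
    ∀ i < n, ((List.range m).foldl (fun M j => pvRowLoopA D l j M)
        (List.replicate n (List.replicate n (-1 : Int)))).getD i []
      = if i < m then pvRowA D l i n else List.replicate n (-1 : Int) := by
  subst hn
  intro m
  induction m with
  | zero =>
      intro _
      refine ⟨by simp, ?_⟩
      intro i hi
      simp [List.getD_eq_getElem?_getD, hi]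
  | succ m ih =>
      intro hm
      obtain ⟨hlen, hrow⟩ := ih (by omega)
      rw [List.range_succ, List.foldl_append, List.foldl_cons, List.foldl_nil]
      set F := (List.range m).foldl (fun M j => pvRowLoopA D l j M)
        (List.replicate l.length (List.replicate l.length (-1 : Int))) with hF
      have hmn : m < l.length := by omega
      have hgetm : F.getD m [] = List.replicate l.length (-1 : Int) := by
        rw [hrow m hmn, if_neg (by omega)]
      have hstep : pvRowLoopA D l m F = F.set m (pvRowA D l m l.length) := by
        have h2 := congrArg Prod.snd (pvFoldRow_comm D l m
          (List.range' (m+1) (l.length - (m+1))) 0 F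
          ((List.replicate l.length (-1 : Int)).set m 0) (by omega))
        unfold pvRowLoopA pvRowA
        rw [hgetm]
        exact h2
      rw [hstep]
      refine ⟨by simpa using hlen, ?_⟩
      intro i hi
      by_cases him : i = m
      · subst him
        rw [List.getD_eq_getElem?_getD, List.getElem?_set_self (by omega), if_pos (by omega)]
        rfl
      · rw [List.getD_eq_getElem?_getD, List.getElem?_set_ne (by omega),
            ← List.getD_eq_getElem?_getD, hrow i hi]
        by_cases h3 : i < m
        · rw [if_pos h3, if_pos (by omega)]
        · rw [if_neg h3, if_neg (by omega)]

-- B's prefix fold: structural scan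
def pvF (D : List (List Int)) : List (Int × Int) → Int → List Int
  | [], _ => []
  | z :: zs, a => (a + pvDist D z.1 z.2) :: pvF D zs (a + pvDist D z.1 z.2)

theorem pvPrefixB_fold (D : List (List Int)) :
    ∀ (zs : List (Int × Int)) (p : List Int), p ≠ [] →
    zs.foldl (fun p ab => p ++ [p.getLastD 0 + pvDist D ab.1 ab.2]) p
      = p ++ pvF D zs (p.getLastD 0) := by
  intro zs
  induction zs with
  | nil => intro p _; simp [pvF]
  | cons z zs ih =>
      intro p hp
      rw [List.foldl_cons, ih _ (by simp)]
      simp [pvF]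

theorem pvF_getD (D : List (List Int)) :
    ∀ (zs : List (Int × Int)) (a : Int) (i : Nat), i < zs.length →
    (pvF D zs a).getD i 0
      = a + (((zs.take (i+1)).map (fun z => pvDist D z.1 z.2)).sum) := by
  intro zs
  induction zs with
  | nil => intro a i hi; simp at hi
  | cons z zs ih =>
      intro a i hi
      cases i with
      | zero => simp [pvF]
      | succ i =>
          have := ih (a + pvDist D z.1 z.2) i (by simpa using hi)
          simp only [pvF, List.getD_cons_succ, this, List.take_succ_cons, List.map_cons,
            List.sum_cons]
          ring

-- the zip's partial sums are segment sums of pvD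
theorem pvZip_take_sum (D : List (List Int)) (l : List Int) :
    ∀ i, i ≤ (l.zip l.tail).length →
    (((l.zip l.tail).take i).map (fun z => pvDist D z.1 z.2)).sum = pvSeg D l 1 i := by
  intro i
  induction i with
  | zero => intro _; simp [pvSeg]
  | succ i ih =>
      intro hi
      have hi' : i < (l.zip l.tail).length := by omega
      have hl : (l.zip l.tail).length = l.length - 1 := by
        simp [List.length_zip, List.length_tail]
      have hil : i + 1 < l.length := by omega
      have h1 : l.getD i 0 = l[i]'(by omega) := by
        rw [List.getD_eq_getElem?_getD, List.getElem?_eq_getElem (by omega)]; rfl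
      have h2 : l.getD (i+1) 0 = (l.tail)[i]'(by simp [List.length_tail]; omega) := by
        rw [List.getElem_tail, List.getD_eq_getElem?_getD,
          List.getElem?_eq_getElem (by omega)]; rfl
      have hz : (l.zip l.tail)[i]? = some (l.getD i 0, l.getD (i+1) 0) := by
        rw [List.getElem?_eq_getElem hi', List.getElem_zip, h1, h2]
      rw [List.take_add_one, List.map_append, List.sum_append, ih (by omega), hz]
      have h3 : (1:Nat) + i = i + 1 := by omega
      rw [pvSeg_concat, h3]
      simp only [Option.toList_some, List.map_cons, List.map_nil, List.sum_cons,
        List.sum_nil, add_zero]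
      congr 1

-- prefix entries are prefix sums of pvD
theorem pvPrefixB_getD (D : List (List Int)) (l : List Int) (i : Nat)
    (hi : i ≤ (l.zip l.tail).length) :
    (pvPrefixB D l).getD i 0 = pvSeg D l 1 i := by
  rw [pvPrefixB, pvPrefixB_fold D _ [0] (by simp)]
  cases i with
  | zero => simp [pvSeg]
  | succ i =>
      have h1 : ([(0:Int)] ++ pvF D (l.zip l.tail) (([(0:Int)]).getLastD 0)).getD (i+1) 0
          = (pvF D (l.zip l.tail) 0).getD i 0 := by simp
      rw [h1, pvF_getD D _ 0 i (by omega), pvZip_take_sum D l (i+1) hi]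
      ring_nf

-- per-line equality of the two constructions
theorem pvLine_eq (D : List (List Int)) (l : List Int) :
    (List.range l.length).foldl (fun M j => pvRowLoopA D l j M)
      (List.replicate l.length (List.replicate l.length (-1 : Int)))
    = (List.range l.length).map (fun j =>
        (List.range l.length).map (fun k =>
          if k < j then -1 else (pvPrefixB D l).getD k 0 - (pvPrefixB D l).getD j 0)) := by
  set n := l.length with hn
  obtain ⟨hlen, hrow⟩ := pvFoldA_spec D l n hn n (le_refl n)
  apply List.ext_getElem
  · simpa using hlen
  intro i h1 h2
  have hin : i < n := by simpa [hlen] using h1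
  have hrowi : _ = _ := hrow i hin
  rw [if_pos hin] at hrowi
  have hzl : (l.zip l.tail).length = n - 1 := by
    simp [List.length_zip, List.length_tail, hn]
  rw [List.getD_eq_getElem?_getD, List.getElem?_eq_getElem h1] at hrowi
  simp only [Option.getD_some] at hrowi
  rw [hrowi, List.getElem_map]
  apply List.ext_getElem
  · rw [pvRowA_length D l i n hin]; simp
  intro k hk1 hk2
  have hkn : k < n := by rw [pvRowA_length D l i n hin] at hk1; exact hk1
  have hgB : (pvRowA D l i n)[k] = (pvRowA D l i n).getD k 0 := by
    rw [List.getD_eq_getElem?_getD, List.getElem?_eq_getElem hk1]; rfl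
  rw [hgB, pvRowA_getD D l i n hin k hkn]
  simp only [List.getElem_range, List.getElem_map]
  by_cases hki : k < i
  · rw [if_pos hki, if_pos (by simpa using hki)]
  · rw [if_neg hki, if_neg (by simpa using hki)]
    rw [pvPrefixB_getD D l k (by omega), pvPrefixB_getD D l i (by omega)]
    have hik : i ≤ k := by omega
    have : pvSeg D l 1 k = pvSeg D l 1 i + pvSeg D l (1+i) (k - i) := by
      rw [← pvSeg_append]
      congr 1; omega
    rw [this]
    have h1i : 1 + i = i + 1 := by omega
    rw [h1i]; ring

theorem pvFold_append_map {α β : Type} (g : α → List β) :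
    ∀ (xs : List α) (acc : List β),
    xs.foldl (fun a x => a ++ g x) acc = acc ++ (xs.map g).flatten := by
  intro xs
  induction xs with
  | nil => intro acc; simp
  | cons x xs ih => intro acc; simp [ih]

-- ===== VERDICT (by name: the statement is the Claim_ definition above) =====
theorem compute_travel_times_on_lines_spec : Claim_equal_compute_travel_times_on_lines := by
  intro cands D hDom hPre
  clear hDom hPre
  unfold Spec_compute_travel_times_on_lines
  unfold compute_travel_times_on_lines compute_travel_times_on_lines_alt
  rw [pvFold_append_map (fun line =>
    [(List.range line.length).foldl (fun M j => pvRowLoopA D line j M)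
      (List.replicate line.length (List.replicate line.length (-1 : Int)))]) cands []]
  simp only [List.nil_append]
  induction cands with
  | nil => rfl
  | cons l ls ih =>
      simp only [List.map_cons, List.flatten_cons, List.singleton_append, List.cons.injEq]
      exact ⟨pvLine_eq D l, by simpa using ih⟩
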